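-- pv_equiv track=rewrite | github.com/EmilioUgarte65/Dexter | skills/skill-creator/scripts/template.py | _build_subparser_defs
-- ===== SOURCE A (Python) =====
-- def _title(name: str) -> str:
--     """Convert kebab-case to Title Case."""
--     return " ".join(word.capitalize() for word in name.split("-"))
--
-- def _build_subparser_defs(commands: list[str], env_prefix: str) -> str:
--     """Generate subparser add_parser() calls with common arguments."""
--     lines = []
--     for cmd in commands:
--         fn_name = cmd.replace("-", "_")
--         lines.append(f"    # {cmd}")
--         if cmd == "create":
--             lines.append(f"    p_{fn_name} = sub.add_parser(\"{cmd}\", help=\"Create a new resource\")")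
--             lines.append(f"    p_{fn_name}.add_argument(\"name\", help=\"Resource name\")")
--         elif cmd == "delete":
--             lines.append(f"    p_{fn_name} = sub.add_parser(\"{cmd}\", help=\"Delete a resource\")")
--             lines.append(f"    p_{fn_name}.add_argument(\"name\", help=\"Resource name or ID\")")
--         elif cmd == "list":
--             lines.append(f"    sub.add_parser(\"{cmd}\", help=\"List all resources\")")
--         else:
--             lines.append(f"    p_{fn_name} = sub.add_parser(\"{cmd}\", help=\"{_title(cmd)}\")")
--             lines.append(f"    p_{fn_name}.add_argument(\"name\", help=\"Resource name or ID\")")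
--         lines.append("")
--     return "\n".join(lines)
-- ===== SOURCE B (Python) =====
-- def _title(name: str) -> str:
--     """Convert kebab-case to Title Case."""
--     return " ".join(word.capitalize() for word in name.split("-"))
--
-- # Known-command config table: (help_text or None meaning _title(cmd), name-arg help or None, emit p_<fn> variable)
-- _CONFIG = {
--     "create": ("Create a new resource", "Resource name", True),
--     "delete": ("Delete a resource", "Resource name or ID", True),
--     "list": ("List all resources", None, False),
-- }
--
-- def _build_subparser_defs(commands: list[str], env_prefix: str) -> str:
--     """Generate subparser add_parser() calls with common arguments."""
--     blocks = []
--     for cmd in commands: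
--         fn = cmd.replace("-", "_")
--         help_text, arg_help, emit_var = _CONFIG.get(cmd, (None, "Resource name or ID", True))
--         if help_text is None:
--             help_text = _title(cmd)
--         block = [f"    # {cmd}"]
--         if emit_var:
--             block.append(f"    p_{fn} = sub.add_parser(\"{cmd}\", help=\"{help_text}\")")
--         else:
--             block.append(f"    sub.add_parser(\"{cmd}\", help=\"{help_text}\")")
--         if arg_help is not None:
--             block.append(f"    p_{fn}.add_argument(\"name\", help=\"{arg_help}\")")
--         block.append("")
--         blocks.append(block)
--     return "\n".join(line for block in blocks for line in block)
-- ===== Notes on version B (the rewrite author's own statement) =====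
-- stated objective: alternative
-- what changed: Replaces the per-command if/elif branch chain with a data-driven config table (help text, optional name-arg help, emit-variable flag) consulted once per command, emitting each command's block from that record and flattening the blocks.
import Mathlib
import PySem

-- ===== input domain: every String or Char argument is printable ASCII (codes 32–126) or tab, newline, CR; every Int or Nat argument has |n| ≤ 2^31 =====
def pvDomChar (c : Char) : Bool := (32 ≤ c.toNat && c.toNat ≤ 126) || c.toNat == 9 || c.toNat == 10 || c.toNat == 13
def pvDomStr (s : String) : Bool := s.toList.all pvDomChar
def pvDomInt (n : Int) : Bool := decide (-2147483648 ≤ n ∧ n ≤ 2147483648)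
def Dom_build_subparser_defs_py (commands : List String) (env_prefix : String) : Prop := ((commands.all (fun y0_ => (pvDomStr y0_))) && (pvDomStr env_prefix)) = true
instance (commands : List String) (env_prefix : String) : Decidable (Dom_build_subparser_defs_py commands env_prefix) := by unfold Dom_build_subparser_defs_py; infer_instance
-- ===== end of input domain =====

-- B replaces A's per-command if/elif chain by a config table (help text, optional name-arg help,
-- emit-variable flag) looked up once per command, emitting each command's block from that record
-- and flattening the blocks; objective: alternative (same cost, data-driven decomposition).


-- ===== PORT A =====
-- word.capitalize(): first code point uppercased, the rest lowercased — exact on the ASCII domain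
def capWord (w : String) : String :=
  match w.toList with
  | [] => ""
  | c :: rest => String.ofList (PySem.Chars.upperChar c :: PySem.Chars.lower rest)

-- name.split("-"): the separator is the nonempty literal "-", so split? is always `some`
def titlePy (name : String) : String :=
  PySem.Str.join " " (((PySem.Str.split? name "-").getD []).map capWord)

def build_subparser_defs_py (commands : List String) (env_prefix : String) : String :=
  let lines := commands.foldl (fun lines cmd =>
    let fn_name := PySem.Str.replace cmd "-" "_"
    let lines := lines ++ ["    # " ++ cmd]
    let lines :=
      if cmd == "create" then
        lines ++ ["    p_" ++ fn_name ++ " = sub.add_parser(\"" ++ cmd ++ "\", help=\"Create a new resource\")",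
                  "    p_" ++ fn_name ++ ".add_argument(\"name\", help=\"Resource name\")"]
      else if cmd == "delete" then
        lines ++ ["    p_" ++ fn_name ++ " = sub.add_parser(\"" ++ cmd ++ "\", help=\"Delete a resource\")",
                  "    p_" ++ fn_name ++ ".add_argument(\"name\", help=\"Resource name or ID\")"]
      else if cmd == "list" then
        lines ++ ["    sub.add_parser(\"" ++ cmd ++ "\", help=\"List all resources\")"]
      else
        lines ++ ["    p_" ++ fn_name ++ " = sub.add_parser(\"" ++ cmd ++ "\", help=\"" ++ titlePy cmd ++ "\")",
                  "    p_" ++ fn_name ++ ".add_argument(\"name\", help=\"Resource name or ID\")"]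
    lines ++ [""]) ([] : List String)
  PySem.Str.join "\n" lines

-- ===== PORT B =====
-- the _CONFIG table of Source B: cmd ↦ (help or none meaning _title(cmd), name-arg help or none, emit p_<fn>?)
def cfgB : PySem.Dict String (Option String × Option String × Bool) :=
  PySem.Dict.mk [("create", (some "Create a new resource", some "Resource name", true)),
                 ("delete", (some "Delete a resource", some "Resource name or ID", true)),
                 ("list", (some "List all resources", none, false))]

-- one command's block of lines, from the config record
def blockB (cmd : String) : List String :=
  let fn := PySem.Str.replace cmd "-" "_"
  let c := (cfgB.get? cmd).getD (none, some "Resource name or ID", true)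
  let help_text := c.1.getD (titlePy cmd)
  let block := ["    # " ++ cmd]
  let block := block ++
    (if c.2.2 then
      ["    p_" ++ fn ++ " = sub.add_parser(\"" ++ cmd ++ "\", help=\"" ++ help_text ++ "\")"]
     else
      ["    sub.add_parser(\"" ++ cmd ++ "\", help=\"" ++ help_text ++ "\")"])
  let block := block ++
    (match c.2.1 with
     | some ah => ["    p_" ++ fn ++ ".add_argument(\"name\", help=\"" ++ ah ++ "\")"]
     | none => [])
  block ++ [""]

def build_subparser_defs_py_alt (commands : List String) (env_prefix : String) : String :=
  PySem.Str.join "\n" (commands.map blockB).flatten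

-- ===== PRECONDITION & SPEC =====
def Spec_build_subparser_defs_py (commands : List String) (env_prefix : String) (out : String) : Prop := out = build_subparser_defs_py_alt commands env_prefix
instance (commands : List String) (env_prefix : String) (out : String) : Decidable (Spec_build_subparser_defs_py commands env_prefix out) := by unfold Spec_build_subparser_defs_py; infer_instance

-- ===== CLAIM (what is proved, stated in full; the proofs are below) =====
def Claim_equal_build_subparser_defs_py : Prop := ∀ (commands : List String) (env_prefix : String), Dom_build_subparser_defs_py commands env_prefix → Spec_build_subparser_defs_py commands env_prefix (build_subparser_defs_py commands env_prefix)

-- ===== LEMMAS AND PROOFS =====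

-- fold literal appends behind a common prefix
lemma append_lit (s a b c d : String) (h : a ++ (b ++ c) = d) :
    s ++ a ++ b ++ c = s ++ d := by
  simp only [String.append_assoc]
  exact congrArg (s ++ ·) h

-- A's loop body appends exactly B's block for that command (stated in the zeta-reduced shape of the fold step)
lemma stepA_eq (lines : List String) (cmd : String) :
    (if cmd == "create" then
        lines ++ ["    # " ++ cmd] ++
          ["    p_" ++ PySem.Str.replace cmd "-" "_" ++ " = sub.add_parser(\"" ++ cmd ++ "\", help=\"Create a new resource\")",
           "    p_" ++ PySem.Str.replace cmd "-" "_" ++ ".add_argument(\"name\", help=\"Resource name\")"]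
      else if cmd == "delete" then
        lines ++ ["    # " ++ cmd] ++
          ["    p_" ++ PySem.Str.replace cmd "-" "_" ++ " = sub.add_parser(\"" ++ cmd ++ "\", help=\"Delete a resource\")",
           "    p_" ++ PySem.Str.replace cmd "-" "_" ++ ".add_argument(\"name\", help=\"Resource name or ID\")"]
      else if cmd == "list" then
        lines ++ ["    # " ++ cmd] ++ ["    sub.add_parser(\"" ++ cmd ++ "\", help=\"List all resources\")"]
      else
        lines ++ ["    # " ++ cmd] ++
          ["    p_" ++ PySem.Str.replace cmd "-" "_" ++ " = sub.add_parser(\"" ++ cmd ++ "\", help=\"" ++ titlePy cmd ++ "\")",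
           "    p_" ++ PySem.Str.replace cmd "-" "_" ++ ".add_argument(\"name\", help=\"Resource name or ID\")"]) ++ [""]
      = lines ++ blockB cmd := by
  by_cases h1 : cmd = "create"
  · subst h1
    simp only [beq_self_eq_true, if_true, List.append_assoc, List.cons_append, List.nil_append]
    refine congrArg (lines ++ ·) ?_ ; decide
  · by_cases h2 : cmd = "delete"
    · subst h2
      simp only [show (("delete" == "create") = false) from rfl, Bool.false_eq_true, if_false,
        beq_self_eq_true, if_true, List.append_assoc, List.cons_append, List.nil_append]
      refine congrArg (lines ++ ·) ?_ ; decide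
    · by_cases h3 : cmd = "list"
      · subst h3
        simp only [show (("list" == "create") = false) from rfl,
          show (("list" == "delete") = false) from rfl, Bool.false_eq_true, if_false,
          beq_self_eq_true, if_true, List.append_assoc, List.cons_append, List.nil_append]
        refine congrArg (lines ++ ·) ?_ ; decide
      · have h1' : ("create" == cmd) = false := by
          simp only [beq_eq_false_iff_ne, ne_eq]; exact fun h => h1 h.symm
        have h2' : ("delete" == cmd) = false := by
          simp only [beq_eq_false_iff_ne, ne_eq]; exact fun h => h2 h.symm
        have h3' : ("list" == cmd) = false := by
          simp only [beq_eq_false_iff_ne, ne_eq]; exact fun h => h3 h.symm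
        have hc1 : (cmd == "create") = false := by simp [beq_eq_false_iff_ne, h1]
        have hc2 : (cmd == "delete") = false := by simp [beq_eq_false_iff_ne, h2]
        have hc3 : (cmd == "list") = false := by simp [beq_eq_false_iff_ne, h3]
        simp only [hc1, hc2, hc3, Bool.false_eq_true, if_false,
          blockB, cfgB, PySem.Dict.get?_mk_cons, h1', h2', h3']
        simp only [PySem.Dict.get?, List.find?_nil, Option.map_none, Option.getD_none, List.append_assoc, List.cons_append, List.nil_append]
        refine congrArg (lines ++ ·) ?_
        refine congrArg (_ :: ·) ?_
        refine congrArg (_ :: ·) ?_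
        have := append_lit ("    p_" ++ PySem.Str.replace cmd "-" "_")
          ".add_argument(\"name\", help=\"" "Resource name or ID" "\")"
          ".add_argument(\"name\", help=\"Resource name or ID\")" (by decide)
        simp only [String.append_assoc] at this ⊢
        rw [this]
        rfl

-- A's whole fold is B's flattened blocks
lemma foldl_eq (cmds : List String) (acc : List String) :
    cmds.foldl (fun lines cmd =>
      let fn_name := PySem.Str.replace cmd "-" "_"
      let lines := lines ++ ["    # " ++ cmd]
      let lines :=
        if cmd == "create" then
          lines ++ ["    p_" ++ fn_name ++ " = sub.add_parser(\"" ++ cmd ++ "\", help=\"Create a new resource\")",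
                    "    p_" ++ fn_name ++ ".add_argument(\"name\", help=\"Resource name\")"]
        else if cmd == "delete" then
          lines ++ ["    p_" ++ fn_name ++ " = sub.add_parser(\"" ++ cmd ++ "\", help=\"Delete a resource\")",
                    "    p_" ++ fn_name ++ ".add_argument(\"name\", help=\"Resource name or ID\")"]
        else if cmd == "list" then
          lines ++ ["    sub.add_parser(\"" ++ cmd ++ "\", help=\"List all resources\")"]
        else
          lines ++ ["    p_" ++ fn_name ++ " = sub.add_parser(\"" ++ cmd ++ "\", help=\"" ++ titlePy cmd ++ "\")",
                    "    p_" ++ fn_name ++ ".add_argument(\"name\", help=\"Resource name or ID\")"]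
      lines ++ [""]) acc = acc ++ (cmds.map blockB).flatten := by
  induction cmds generalizing acc with
  | nil => simp
  | cons c cs ih =>
      simp only [List.foldl_cons, List.map_cons, List.flatten_cons]
      rw [ih, stepA_eq acc c]
      simp [List.append_assoc]

-- ===== VERDICT (by name: the statement is the Claim_ definition above) =====
theorem build_subparser_defs_py_spec : Claim_equal_build_subparser_defs_py := by
  intro commands env_prefix _
  unfold Spec_build_subparser_defs_py build_subparser_defs_py build_subparser_defs_py_alt
  rw [foldl_eq]
  simp
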